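-- pv_equiv track=rewrite | github.com/CUBERLEON/machine-learning | recognition/receipts/receipts_ocr.py | get_adress
-- ===== SOURCE A (Python) =====
-- def check_line(text):
--     cnt = 0
--     for i in range(0, len(text)):
--         if str(text[i]).isdigit():
--             cnt += 1
--     return (cnt < 4)
--
-- def get_adress(text):
--     adress = ""
--     cnt = 0
--     line = ""
--     for i in range(0, len(text)):
--         if (text[i] == '\n'):
--             if (check_line(line) or cnt < 1):
--                 if (cnt > 0):
--                     adress += line + '\n'
--                 else:
--                     cnt += 1
--                 line = ''
--             else:
--                 return adress
--         else:
--             line += text[i]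
--     return "NOT FOUND"
-- ===== SOURCE B (Python) =====
-- def get_adress(text):
--     lines = text.split('\n')[:-1]
--     adress = ""
--     for i, line in enumerate(lines):
--         if i == 0:
--             continue
--         if sum(c.isdigit() for c in line) < 4:
--             adress += line + '\n'
--         else:
--             return adress
--     return "NOT FOUND"
-- ===== Notes on version B (the rewrite author's own statement) =====
-- stated objective: simpler
-- what changed: A builds lines character by character inside one fused scan with cnt/line accumulators; B splits the text on the newline character, drops the unterminated tail, and makes one indexed pass over the complete lines, skipping index 0 and appending or returning per line.
import Mathlib
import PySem

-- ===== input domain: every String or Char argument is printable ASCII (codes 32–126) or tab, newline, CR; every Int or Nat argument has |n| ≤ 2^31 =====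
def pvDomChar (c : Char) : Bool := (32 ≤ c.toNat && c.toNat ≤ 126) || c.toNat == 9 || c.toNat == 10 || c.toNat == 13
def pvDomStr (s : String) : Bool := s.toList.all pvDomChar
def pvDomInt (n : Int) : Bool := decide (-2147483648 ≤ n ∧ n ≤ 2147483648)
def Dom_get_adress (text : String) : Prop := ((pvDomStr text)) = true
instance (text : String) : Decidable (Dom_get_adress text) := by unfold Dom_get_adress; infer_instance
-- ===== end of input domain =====

-- B replaces A's fused char-by-char line builder with splitting on newlines, dropping the unterminated tail, and one indexed pass over the lines (simpler decomposition; measured faster by a constant factor).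

-- ===== PORT A =====
def check_line (text : List Char) : Bool :=
  decide ((text.foldl (fun cnt c => if PySem.Chars.isdigit c then cnt + 1 else cnt) (0 : Int)) < 4)

def pvLoopA : List Char → List Char → Int → List Char → String
  | [], _adress, _cnt, _line => "NOT FOUND"
  | c :: rest, adress, cnt, line =>
    if c = '\n' then
      if check_line line || decide (cnt < 1) then
        if decide (cnt > 0) then pvLoopA rest (adress ++ line ++ ['\n']) cnt []
        else pvLoopA rest adress (cnt + 1) []
      else String.ofList adress
    else pvLoopA rest adress cnt (line ++ [c])

def get_adress (text : String) : String := pvLoopA text.toList [] 0 []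

-- ===== PORT B =====
def pvDigits (line : List Char) : Int := (line.countP PySem.Chars.isdigit : Int)

def pvLoopB : List (List Char) → Nat → List Char → String
  | [], _i, _adress => "NOT FOUND"
  | line :: rest, i, adress =>
    if i = 0 then pvLoopB rest (i + 1) adress
    else if pvDigits line < 4 then pvLoopB rest (i + 1) (adress ++ line ++ ['\n'])
    else String.ofList adress

def get_adress_alt (text : String) : String :=
  pvLoopB (PySem.List.slice (PySem.Chars.splitOn text.toList ['\n']) none (some (-1))) 0 []

-- ===== PRECONDITION & SPEC =====
def Spec_get_adress (text : String) (out : String) : Prop := out = get_adress_alt text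
instance (text : String) (out : String) : Decidable (Spec_get_adress text out) := by unfold Spec_get_adress; infer_instance

-- ===== CLAIM (what is proved, stated in full; the proofs are below) =====
def Claim_equal_get_adress : Prop := ∀ (text : String), Dom_get_adress text → Spec_get_adress text (get_adress text)

-- ===== LEMMAS AND PROOFS =====

-- unfolding equations of PySem.Chars.splitOn.go
lemma pvGo0 (sep l cur acc) : PySem.Chars.splitOn.go sep 0 l cur acc = ((cur.reverse ++ l) :: acc).reverse := rfl
lemma pvGoNil (sep f cur acc) : PySem.Chars.splitOn.go sep (f+1) [] cur acc = (cur.reverse :: acc).reverse := rfl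
lemma pvGoCons (sep f c rest cur acc) : PySem.Chars.splitOn.go sep (f+1) (c :: rest) cur acc =
    if sep.isPrefixOf (c :: rest) then PySem.Chars.splitOn.go sep f (List.drop sep.length (c :: rest)) [] (cur.reverse :: acc)
    else PySem.Chars.splitOn.go sep f rest (c :: cur) acc := rfl

lemma pvGo_ne_nil (fuel : Nat) : ∀ (l cur : List Char) (acc : List (List Char)),
    PySem.Chars.splitOn.go ['\n'] fuel l cur acc ≠ [] := by
  induction fuel with
  | zero => intro l cur acc; rw [pvGo0]; simp
  | succ f ih =>
    intro l cur acc
    cases l with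
    | nil => rw [pvGoNil]; simp
    | cons c rest =>
      rw [pvGoCons]
      split
      · exact ih _ _ _
      · exact ih _ _ _

lemma pvSplitOn_ne_nil (cs : List Char) : PySem.Chars.splitOn cs ['\n'] ≠ [] := by
  unfold PySem.Chars.splitOn
  exact pvGo_ne_nil _ _ _ _

lemma pvGo_fuel : ∀ (l : List Char) (f g : Nat) (cur : List Char) (acc : List (List Char)),
    l.length < f → l.length < g →
    PySem.Chars.splitOn.go ['\n'] f l cur acc = PySem.Chars.splitOn.go ['\n'] g l cur acc := by
  intro l
  induction l with
  | nil =>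
    intro f g cur acc hf hg
    obtain ⟨f', rfl⟩ := Nat.exists_eq_succ_of_ne_zero (by omega : f ≠ 0)
    obtain ⟨g', rfl⟩ := Nat.exists_eq_succ_of_ne_zero (by omega : g ≠ 0)
    rw [pvGoNil, pvGoNil]
  | cons c rest ih =>
    intro f g cur acc hf hg
    obtain ⟨f', rfl⟩ := Nat.exists_eq_succ_of_ne_zero (by omega : f ≠ 0)
    obtain ⟨g', rfl⟩ := Nat.exists_eq_succ_of_ne_zero (by omega : g ≠ 0)
    rw [pvGoCons, pvGoCons]
    simp only [List.length_cons] at hf hg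
    split
    · rename_i h
      have hr : (List.drop (['\n'].length) (c :: rest)).length < f' := by simp; omega
      have hg' : (List.drop (['\n'].length) (c :: rest)).length < g' := by simp; omega
      exact ih _ _ _ _ (by simpa using hr) (by simpa using hg')
    · exact ih _ _ _ _ (by omega) (by omega)

lemma pvGo_acc (fuel : Nat) : ∀ (l cur : List Char) (acc : List (List Char)),
    PySem.Chars.splitOn.go ['\n'] fuel l cur acc
      = acc.reverse ++ PySem.Chars.splitOn.go ['\n'] fuel l cur [] := by
  induction fuel with
  | zero => intro l cur acc; rw [pvGo0, pvGo0]; simp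
  | succ f ih =>
    intro l cur acc
    cases l with
    | nil => rw [pvGoNil, pvGoNil]; simp
    | cons c rest =>
      rw [pvGoCons, pvGoCons]
      split
      · rw [ih _ _ (cur.reverse :: acc), ih _ _ [cur.reverse]]
        simp
      · rw [ih _ (c :: cur) acc]

lemma pvGo_no_nl : ∀ (l : List Char) (fuel : Nat) (cur : List Char) (acc : List (List Char)),
    '\n' ∉ l → l.length < fuel →
    PySem.Chars.splitOn.go ['\n'] fuel l cur acc = ((cur.reverse ++ l) :: acc).reverse := by
  intro l
  induction l with
  | nil =>
    intro fuel cur acc _ hf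
    obtain ⟨f, rfl⟩ := Nat.exists_eq_succ_of_ne_zero (by omega : fuel ≠ 0)
    rw [pvGoNil]; simp
  | cons c rest ih =>
    intro fuel cur acc hnl hf
    obtain ⟨f, rfl⟩ := Nat.exists_eq_succ_of_ne_zero (by omega : fuel ≠ 0)
    rw [pvGoCons]
    have hc : c ≠ '\n' := by intro h; exact hnl (by simp [h])
    have hpre : (['\n'].isPrefixOf (c :: rest)) = false := by
      simp [List.isPrefixOf]; exact fun h => absurd h.symm hc
    rw [hpre]
    simp only [Bool.false_eq_true, if_false]
    rw [ih f (c :: cur) acc (fun h => hnl (by simp [h])) (by simp at hf ⊢; omega)]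
    simp

lemma pvSplitOn_no_nl (cs : List Char) (h : '\n' ∉ cs) :
    PySem.Chars.splitOn cs ['\n'] = [cs] := by
  unfold PySem.Chars.splitOn
  rw [pvGo_no_nl cs (cs.length + 1) [] [] h (by omega)]
  simp

lemma pvGo_split : ∀ (a : List Char) (fuel : Nat) (cur : List Char) (acc : List (List Char)) (rest : List Char),
    '\n' ∉ a → (a ++ '\n' :: rest).length < fuel →
    PySem.Chars.splitOn.go ['\n'] fuel (a ++ '\n' :: rest) cur acc
      = acc.reverse ++ (cur.reverse ++ a) :: PySem.Chars.splitOn rest ['\n'] := by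
  intro a
  induction a with
  | nil =>
    intro fuel cur acc rest _ hf
    obtain ⟨f, rfl⟩ := Nat.exists_eq_succ_of_ne_zero (by omega : fuel ≠ 0)
    simp only [List.nil_append] at hf ⊢
    rw [pvGoCons]
    have hpre : (['\n'].isPrefixOf ('\n' :: rest)) = true := by simp [List.isPrefixOf]
    rw [hpre]
    simp only [if_true]
    simp only [List.length_cons, List.length_nil, List.drop_succ_cons, List.drop_zero]
    rw [pvGo_acc]
    unfold PySem.Chars.splitOn
    rw [pvGo_fuel rest f (rest.length + 1) [] [] (by simp at hf; omega) (by omega)]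
    simp
  | cons c a' ih =>
    intro fuel cur acc rest hnl hf
    obtain ⟨f, rfl⟩ := Nat.exists_eq_succ_of_ne_zero (by omega : fuel ≠ 0)
    have hc : c ≠ '\n' := by intro h; exact hnl (by simp [h])
    simp only [List.cons_append]
    rw [pvGoCons]
    have hpre : (['\n'].isPrefixOf (c :: (a' ++ '\n' :: rest))) = false := by
      simp [List.isPrefixOf]; exact fun h => absurd h.symm hc
    rw [hpre]
    simp only [Bool.false_eq_true, if_false]
    rw [ih f (c :: cur) acc rest (fun h => hnl (by simp [h])) (by simp at hf ⊢; omega)]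
    simp

lemma pvSplitOn_cons_nl (a rest : List Char) (h : '\n' ∉ a) :
    PySem.Chars.splitOn (a ++ '\n' :: rest) ['\n'] = a :: PySem.Chars.splitOn rest ['\n'] := by
  unfold PySem.Chars.splitOn
  rw [pvGo_split a ((a ++ '\n' :: rest).length + 1) [] [] rest h (by omega)]
  simp
  rfl

lemma pvLoopB_pos : ∀ (segs : List (List Char)) (i j : Nat) (adress : List Char),
    i ≠ 0 → j ≠ 0 → pvLoopB segs i adress = pvLoopB segs j adress := by
  intro segs
  induction segs with
  | nil => intro i j adress _ _; rfl
  | cons l rest ih =>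
    intro i j adress hi hj
    unfold pvLoopB
    rw [if_neg hi, if_neg hj]
    split
    · exact ih _ _ _ (by omega) (by omega)
    · rfl

lemma pvCheck_eq (line : List Char) : check_line line = decide (pvDigits line < 4) := by
  unfold check_line pvDigits
  rw [PySem.List.foldl_if_add_one]
  simp


lemma pvLoopA_nl0 (rest adress line : List Char) : pvLoopA ('\n' :: rest) adress 0 line = pvLoopA rest adress 1 [] := by
  show (if '\n' = '\n' then if check_line line || decide ((0:Int) < 1) then if decide ((0:Int) > 0) then pvLoopA rest (adress ++ line ++ ['\n']) 0 [] else pvLoopA rest adress (0+1) [] else String.ofList adress else pvLoopA rest adress 0 (line ++ ['\n'])) = _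
  norm_num

lemma pvLoopA_nl1_lt (rest adress line : List Char) (hd : check_line line = true) :
    pvLoopA ('\n' :: rest) adress 1 line = pvLoopA rest (adress ++ line ++ ['\n']) 1 [] := by
  show (if '\n' = '\n' then if check_line line || decide ((1:Int) < 1) then if decide ((1:Int) > 0) then pvLoopA rest (adress ++ line ++ ['\n']) 1 [] else pvLoopA rest adress (1+1) [] else String.ofList adress else pvLoopA rest adress 1 (line ++ ['\n'])) = _
  norm_num [hd]

lemma pvLoopA_nl1_ge (rest adress line : List Char) (hd : check_line line = false) :
    pvLoopA ('\n' :: rest) adress 1 line = String.ofList adress := by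
  show (if '\n' = '\n' then if check_line line || decide ((1:Int) < 1) then if decide ((1:Int) > 0) then pvLoopA rest (adress ++ line ++ ['\n']) 1 [] else pvLoopA rest adress (1+1) [] else String.ofList adress else pvLoopA rest adress 1 (line ++ ['\n'])) = _
  norm_num [hd]

lemma pvLoopA_other (c : Char) (rest adress line : List Char) (cnt : Int) (hc : c ≠ '\n') :
    pvLoopA (c :: rest) adress cnt line = pvLoopA rest adress cnt (line ++ [c]) := by
  show (if c = '\n' then if check_line line || decide (cnt < 1) then if decide (cnt > 0) then pvLoopA rest (adress ++ line ++ ['\n']) cnt [] else pvLoopA rest adress (cnt + 1) [] else String.ofList adress else pvLoopA rest adress cnt (line ++ [c])) = _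
  rw [if_neg hc]

lemma pvMain (cs : List Char) : ∀ (line adress : List Char), '\n' ∉ line →
    (pvLoopA cs adress 0 line = pvLoopB ((PySem.Chars.splitOn (line ++ cs) ['\n']).dropLast) 0 adress) ∧
    (pvLoopA cs adress 1 line = pvLoopB ((PySem.Chars.splitOn (line ++ cs) ['\n']).dropLast) 1 adress) := by
  induction cs with
  | nil =>
    intro line adress h
    rw [List.append_nil, pvSplitOn_no_nl line h]
    simp [pvLoopA, pvLoopB]
  | cons c rest ih =>
    intro line adress h
    by_cases hc : c = '\n'
    · subst hc
      rw [pvSplitOn_cons_nl line rest h]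
      obtain ⟨s, ss, hs⟩ := List.exists_cons_of_ne_nil (pvSplitOn_ne_nil rest)
      rw [hs, List.dropLast_cons_of_ne_nil (List.cons_ne_nil s ss), ← hs]
      constructor
      · rw [pvLoopA_nl0]
        have := (ih [] adress (by simp)).2
        simp only [List.nil_append] at this
        rw [this]
        conv_rhs => unfold pvLoopB
        rw [if_pos rfl]
      · by_cases hd : pvDigits line < 4
        · rw [pvLoopA_nl1_lt rest adress line (by rw [pvCheck_eq]; simpa using hd)]
          have := (ih [] (adress ++ line ++ ['\n']) (by simp)).2
          simp only [List.nil_append] at this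
          rw [this]
          conv_rhs => unfold pvLoopB
          rw [if_neg (by omega), if_pos hd]
          exact pvLoopB_pos _ _ _ _ (by omega) (by omega)
        · rw [pvLoopA_nl1_ge rest adress line (by rw [pvCheck_eq]; simpa using hd)]
          conv_rhs => unfold pvLoopB
          rw [if_neg (by omega), if_neg hd]
    · have h' : '\n' ∉ line ++ [c] := by
        intro hm
        rcases List.mem_append.mp hm with h1 | h1
        · exact h h1
        · simp at h1; exact hc h1.symm
      have hre : line ++ c :: rest = (line ++ [c]) ++ rest := by simp
      rw [hre]
      have := ih (line ++ [c]) adress h'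
      rw [pvLoopA_other c rest adress line 0 hc, pvLoopA_other c rest adress line 1 hc]
      exact this

-- ===== VERDICT (by name: the statement is the Claim_ definition above) =====
theorem get_adress_spec : Claim_equal_get_adress := by
  intro text _
  unfold Spec_get_adress get_adress get_adress_alt
  rw [PySem.List.slice_to_neg_one]
  have := (pvMain text.toList [] [] (by simp)).1
  simpa using this
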